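-- pv_equiv track=rewrite | github.com/said-racha/Complexity-and-Approximation-Algorithms | Graphe.py | getListMaxDegre
-- ===== SOURCE A (Python) =====
-- def getDegres (G): #retourne un tableau de tuple tel que chaque sommet et associé à son degré
--   degres=[]
--
--   for sommet in G[1]: #parcourir tous les sommets de G
--     degre=0
--     for arete in G[3]: #compter le nombre de fois ou chaque sommet apparait en tant qu'extrémité d'une arete
--       if sommet in arete :
--         degre +=1
--     degres.append((sommet, degre)) #créer un tuple pour représenté le degré de chaque sommet de G
--
--   return degres
--
-- def getListMaxDegre (G):
--   degres=getDegres(G) #recuperer le tableau contenant les degrés des sommets de G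
--   #initialiser les variables
--   max=-1
--   sommet_max=[]
--
--   #parcourir les tuples du tableau de sorte à ressortir le degré max de G
--   for tuple in degres:
--     if tuple[1]>max:
--       max=tuple[1]
--   #parcourir les tuples du tableau de sorte à ressortir tous les sommets de degré max dans G
--   for tuple in degres:
--     if tuple[1]==max:
--       sommet_max.append(tuple[0])
--
--   return sommet_max
-- ===== SOURCE B (Python) =====
-- def getListMaxDegre(G):
--     # one pass over the edges accumulating degrees in a dict, then scan vertices
--     deg = {}
--     for u, v in G[3]:
--         deg[u] = deg.get(u, 0) + 1
--         if v != u: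
--             deg[v] = deg.get(v, 0) + 1
--     m = -1
--     for s in G[1]:
--         d = deg.get(s, 0)
--         if d > m:
--             m = d
--     return [s for s in G[1] if deg.get(s, 0) == m]
-- ===== Notes on version B (the rewrite author's own statement) =====
-- stated objective: faster
-- what changed: Replaces the per-vertex scan of the whole edge list (and the intermediate (vertex,degree) tuple list) by a single pass over the edges accumulating degrees in a dict, then a scan of the vertex list for the max and a filter.
import Mathlib
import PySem

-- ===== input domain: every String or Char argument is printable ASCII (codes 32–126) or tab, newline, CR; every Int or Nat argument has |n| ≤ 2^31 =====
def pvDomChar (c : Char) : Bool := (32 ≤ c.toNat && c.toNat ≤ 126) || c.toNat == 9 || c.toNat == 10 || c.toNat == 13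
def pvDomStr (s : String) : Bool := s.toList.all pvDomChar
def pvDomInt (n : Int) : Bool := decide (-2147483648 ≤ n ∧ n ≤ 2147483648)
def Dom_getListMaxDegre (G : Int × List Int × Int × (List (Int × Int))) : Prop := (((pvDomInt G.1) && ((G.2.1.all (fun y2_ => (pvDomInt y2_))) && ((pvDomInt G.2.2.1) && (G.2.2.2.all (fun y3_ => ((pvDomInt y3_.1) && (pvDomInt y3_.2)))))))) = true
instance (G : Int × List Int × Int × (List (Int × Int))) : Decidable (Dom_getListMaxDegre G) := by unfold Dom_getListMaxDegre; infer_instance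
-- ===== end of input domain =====

-- B replaces A's per-vertex scan of the whole edge list by one pass over the edges
-- accumulating degrees in a dict, then a scan of the vertices (objective: faster, O(V+E) vs O(V*E)).

-- ===== PORT A =====
-- inner loop of getDegres: count, for a vertex, the edges it occurs in ('sommet in arete')
def pvDegre (edges : List (Int × Int)) (sommet : Int) : Int :=
  edges.foldl (fun degre arete => if sommet = arete.1 ∨ sommet = arete.2 then degre + 1 else degre) 0

def getDegres (G : Int × List Int × Int × (List (Int × Int))) : List (Int × Int) :=
  G.2.1.foldl (fun degres sommet => degres ++ [(sommet, pvDegre G.2.2.2 sommet)]) []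

def getListMaxDegre (G : Int × List Int × Int × (List (Int × Int))) : List Int :=
  let degres := getDegres G
  let maxv : Int := degres.foldl (fun m t => if t.2 > m then t.2 else m) (-1)
  degres.foldl (fun acc t => if t.2 = maxv then acc ++ [t.1] else acc) []

-- ===== PORT B =====
-- for u, v in G[3]: deg[u] = deg.get(u,0)+1; if v != u: deg[v] = deg.get(v,0)+1
def pvDegDict (edges : List (Int × Int)) : PySem.Dict Int Int :=
  edges.foldl
    (fun d e =>
      let d1 := d.insert e.1 (d.getD e.1 0 + 1)
      if e.2 ≠ e.1 then d1.insert e.2 (d1.getD e.2 0 + 1) else d1)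
    PySem.Dict.empty

def getListMaxDegre_alt (G : Int × List Int × Int × (List (Int × Int))) : List Int :=
  let deg := pvDegDict G.2.2.2
  let m : Int := G.2.1.foldl (fun m s => let d := deg.getD s 0; if d > m then d else m) (-1)
  G.2.1.filter (fun s => deg.getD s 0 = m)

-- ===== PRECONDITION & SPEC =====
def Spec_getListMaxDegre (G : Int × List Int × Int × (List (Int × Int))) (out : List Int) : Prop := out = getListMaxDegre_alt G
instance (G : Int × List Int × Int × (List (Int × Int))) (out : List Int) : Decidable (Spec_getListMaxDegre G out) := by unfold Spec_getListMaxDegre; infer_instance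

-- ===== CLAIM (what is proved, stated in full; the proofs are below) =====
def Claim_equal_getListMaxDegre : Prop := ∀ (G : Int × List Int × Int × (List (Int × Int))), Dom_getListMaxDegre G → Spec_getListMaxDegre G (getListMaxDegre G)

-- ===== LEMMAS AND PROOFS =====

-- A's inner counting loop is a countP
theorem pvDegre_eq_countP (edges : List (Int × Int)) (s : Int) :
    pvDegre edges s = (edges.countP (fun e => decide (s = e.1 ∨ s = e.2)) : Int) := by
  simpa [pvDegre] using
    PySem.List.foldl_ite_add_one (p := fun e : Int × Int => s = e.1 ∨ s = e.2)
      (l := edges) (a := 0)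

-- the dict built by B's edge pass records exactly A's per-vertex degree
theorem pvDegDict_getD (edges : List (Int × Int)) (s : Int) :
    (pvDegDict edges).getD s 0 = pvDegre edges s := by
  suffices h : ∀ (d : PySem.Dict Int Int),
      (edges.foldl
        (fun d e =>
          let d1 := d.insert e.1 (d.getD e.1 0 + 1)
          if e.2 ≠ e.1 then d1.insert e.2 (d1.getD e.2 0 + 1) else d1)
        d).getD s 0 = d.getD s 0 + pvDegre edges s by
    simpa [pvDegDict] using h PySem.Dict.empty
  induction edges with
  | nil => intro d; simp [pvDegre]
  | cons e t ih =>
    intro d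
    simp only [List.foldl_cons]
    rw [ih]
    have hdeg : pvDegre (e :: t) s
        = (if s = e.1 ∨ s = e.2 then (1:Int) else 0) + pvDegre t s := by
      rw [pvDegre_eq_countP, pvDegre_eq_countP, List.countP_cons]
      by_cases h : s = e.1 ∨ s = e.2
      · simp [h]; ring
      · simp [h]
    rw [hdeg]
    by_cases hvu : e.2 = e.1
    · simp only [hvu, ne_eq, not_true_eq_false, ite_false]
      rw [PySem.Dict.getD_insert]
      by_cases hs : s = e.1
      · simp [hs]; ring
      · simp [hs]
    · simp only [ne_eq, hvu, not_false_iff, ite_true]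
      rw [PySem.Dict.getD_insert, PySem.Dict.getD_insert, PySem.Dict.getD_insert]
      by_cases h1 : s = e.1 <;> by_cases h2 : s = e.2
      · exact absurd (h1.symm.trans h2) (Ne.symm hvu)
      · simp [h1, Ne.symm hvu]; ring
      · simp [h2, hvu]; ring
      · simp [h1, h2]

-- A's intermediate tuple list, in closed form
theorem getDegres_eq_map (G : Int × List Int × Int × (List (Int × Int))) :
    getDegres G = G.2.1.map (fun s => (s, pvDegre G.2.2.2 s)) := by
  simpa [getDegres] using
    PySem.List.foldl_append_singleton_eq_map (l := G.2.1)
      (f := fun s => (s, pvDegre G.2.2.2 s)) (acc := [])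

theorem getListMaxDegre_spec' (G : Int × List Int × Int × (List (Int × Int))) :
    getListMaxDegre G = getListMaxDegre_alt G := by
  have hgd : ∀ s : Int, (pvDegDict G.2.2.2).getD s 0 = pvDegre G.2.2.2 s :=
    fun s => pvDegDict_getD G.2.2.2 s
  simp only [getListMaxDegre, getListMaxDegre_alt]
  rw [getDegres_eq_map]
  -- the two max loops agree
  have hmax :
      (G.2.1.map (fun s => (s, pvDegre G.2.2.2 s))).foldl
          (fun m t => if t.2 > m then t.2 else m) (-1)
        = G.2.1.foldl
            (fun m s => if (pvDegDict G.2.2.2).getD s 0 > m then (pvDegDict G.2.2.2).getD s 0 else m) (-1) := by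
    rw [List.foldl_map]
    exact PySem.List.foldl_congr_mem G.2.1
      (fun m y => if (y, pvDegre G.2.2.2 y).2 > m then (y, pvDegre G.2.2.2 y).2 else m)
      (fun m s => if (pvDegDict G.2.2.2).getD s 0 > m then (pvDegDict G.2.2.2).getD s 0 else m)
      (-1) (fun acc x _ => by simp [hgd x])
  rw [← hmax]
  -- the collecting loop is a filter-and-project; A maps over tuples, B filters the vertex list
  rw [PySem.List.foldl_append_ite (p := fun t : Int × Int =>
        t.2 = (G.2.1.map (fun s => (s, pvDegre G.2.2.2 s))).foldl
          (fun m t => if t.2 > m then t.2 else m) (-1)) (f := Prod.fst)]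
  simp only [List.nil_append, List.filter_map, List.map_map]
  rw [show (Prod.fst ∘ fun s : Int => (s, pvDegre G.2.2.2 s)) = id from rfl, List.map_id]
  refine List.filter_congr fun s _ => ?_
  simp [hgd s]

-- ===== VERDICT (by name: the statement is the Claim_ definition above) =====
theorem getListMaxDegre_spec : Claim_equal_getListMaxDegre := by
  intro G _
  exact getListMaxDegre_spec' G
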